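-- pv_equiv track=rewrite | github.com/k-onoue/lukasiewicz_2 | src/setup_problem_primal.py | _split_neg_idx_list
-- ===== SOURCE A (Python) =====
-- from typing import List, Tuple, Union
--
-- def _split_neg_idx_list(idx_list: List[int]) -> List[List[int]]:
--     """
--     Splits an index list into contiguous sublists.
--
--     Parameters
--     ----------
--     idx_list : list of int
--         The index list to split.
--
--     Returns
--     -------
--     list of list of int
--         The split index list.
--     """
--     result = []
--     tmp = []
--
--     for i in range(len(idx_list)):
--         if not tmp or idx_list[i] == tmp[-1] + 1:
--             tmp.append(idx_list[i])
--         else: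
--             result.append(tmp)
--             tmp = [idx_list[i]]
--
--     if tmp:
--         result.append(tmp)
--
--     return result
-- ===== SOURCE B (Python) =====
-- def _split_neg_idx_list(idx_list):
--     """Two staged passes instead of an incremental buffer: first compute the
--     list of cut positions (every i where contiguity breaks, framed by 0 and n),
--     then slice the input between consecutive cuts.  The a < b guard only drops
--     the empty (0, 0) slice produced by the empty input."""
--     n = len(idx_list)
--     cuts = [0] + [i for i in range(1, n) if idx_list[i] != idx_list[i - 1] + 1] + [n]
--     return [idx_list[a:b] for a, b in zip(cuts, cuts[1:]) if a < b]
-- ===== Notes on version B (the rewrite author's own statement) =====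
-- stated objective: alternative
-- what changed: Replaces A's one-pass buffer-and-flush scan (append to tmp while contiguous, flush tmp into result on a break and again after the loop) by two staged passes: first compute the list of cut positions where contiguity breaks (framed by 0 and n), then materialize the answer as slices of the input between consecutive cuts.
import Mathlib
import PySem

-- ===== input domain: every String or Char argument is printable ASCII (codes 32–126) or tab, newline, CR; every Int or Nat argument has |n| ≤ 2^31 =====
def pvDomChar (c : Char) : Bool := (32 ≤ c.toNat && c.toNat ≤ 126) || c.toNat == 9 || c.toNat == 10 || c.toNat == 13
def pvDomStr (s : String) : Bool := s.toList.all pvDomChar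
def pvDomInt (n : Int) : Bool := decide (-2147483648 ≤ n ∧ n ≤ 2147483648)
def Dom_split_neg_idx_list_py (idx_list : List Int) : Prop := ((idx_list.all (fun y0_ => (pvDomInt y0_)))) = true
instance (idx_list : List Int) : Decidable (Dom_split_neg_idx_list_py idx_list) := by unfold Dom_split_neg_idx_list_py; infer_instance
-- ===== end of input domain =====

-- B replaces A's buffer-and-flush scan by two staged passes — compute the cut
-- positions, then slice between consecutive cuts; same cost, different algorithm.

-- ===== PORT A =====
-- loop body: `if not tmp or idx_list[i] == tmp[-1] + 1: tmp.append(x) else: result.append(tmp); tmp = [x]`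
-- (tmp[-1] is read only under the `not tmp` guard, so getLastD 0 is exact there)
def aStep (st : List (List Int) × List Int) (x : Int) : List (List Int) × List Int :=
  if st.2.isEmpty || x == st.2.getLastD 0 + 1 then (st.1, st.2 ++ [x])
  else (st.1 ++ [st.2], [x])

def split_neg_idx_list_py (idx_list : List Int) : List (List Int) :=
  let st := idx_list.foldl aStep ([], [])
  if st.2.isEmpty then st.1 else st.1 ++ [st.2]

-- ===== PORT B =====
-- `cuts = [0] + [i for i in range(1, n) if idx_list[i] != idx_list[i-1] + 1] + [n]`
-- (every i drawn from range(1, n) is in range, so pyGetD _ _ 0 is exact for idx_list[i])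
-- `[idx_list[a:b] for a, b in zip(cuts, cuts[1:]) if a < b]`
def split_neg_idx_list_py_alt (idx_list : List Int) : List (List Int) :=
  let n : Int := idx_list.length
  let cuts : List Int :=
    0 :: ((PySem.List.pyRange 1 n 1).filter
      (fun i => !(PySem.List.pyGetD idx_list i 0 == PySem.List.pyGetD idx_list (i - 1) 0 + 1)) ++ [n])
  (cuts.zip cuts.tail).filterMap
    (fun p => if p.1 < p.2 then some (PySem.List.slice idx_list (some p.1) (some p.2)) else none)

-- ===== PRECONDITION & SPEC =====
def Spec_split_neg_idx_list_py (idx_list : List Int) (out : List (List Int)) : Prop := out = split_neg_idx_list_py_alt idx_list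
instance (idx_list : List Int) (out : List (List Int)) : Decidable (Spec_split_neg_idx_list_py idx_list out) := by unfold Spec_split_neg_idx_list_py; infer_instance

-- ===== CLAIM (what is proved, stated in full; the proofs are below) =====
def Claim_equal_split_neg_idx_list_py : Prop := ∀ (idx_list : List Int), Dom_split_neg_idx_list_py idx_list → Spec_split_neg_idx_list_py idx_list (split_neg_idx_list_py idx_list)

-- ===== LEMMAS AND PROOFS =====

-- Common specification: chunks = peel the maximal contiguous run, recurse on the rest.
def takeRun (x : Int) : List Int → List Int × List Int
  | [] => ([x], [])
  | y :: ys => if y = x + 1 then ((takeRun y ys).1.cons x, (takeRun y ys).2) else ([x], y :: ys)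

theorem takeRun_snd_length (xs : List Int) : ∀ x, (takeRun x xs).2.length ≤ xs.length := by
  induction xs with
  | nil => intro x; simp [takeRun]
  | cons y ys ih =>
    intro x
    by_cases h : y = x + 1 <;> simp [takeRun, h]
    exact le_trans (ih _) (Nat.le_succ _)

def chR : List Int → List (List Int)
  | [] => []
  | x :: xs => (takeRun x xs).1 :: chR (takeRun x xs).2
termination_by l => l.length
decreasing_by
  have := takeRun_snd_length xs x
  simp only [List.length_cons]; omega

-- ---- A-side: the flushed fold equals chR ----

theorem a_fold (xs : List Int) : ∀ (res : List (List Int)) (t : List Int) (x : Int),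
    (let st := xs.foldl aStep (res, t ++ [x])
     if st.2.isEmpty then st.1 else st.1 ++ [st.2])
      = res ++ (t ++ (takeRun x xs).1) :: chR (takeRun x xs).2 := by
  induction xs with
  | nil => intro res t x; simp [takeRun, chR]
  | cons y ys ih =>
    intro res t x
    simp only [List.foldl_cons]
    by_cases h : y = x + 1
    · have hA : aStep (res, t ++ [x]) y = (res, (t ++ [x]) ++ [y]) := by simp [aStep, h]
      have hT : takeRun x (y :: ys) = ((takeRun y ys).1.cons x, (takeRun y ys).2) := by
        simp [takeRun, h]
      rw [hA, hT]
      have := ih res (t ++ [x]) y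
      simpa [List.cons_append, List.append_assoc] using this
    · have hA : aStep (res, t ++ [x]) y = (res ++ [t ++ [x]], [y]) := by simp [aStep, h]
      have hT : takeRun x (y :: ys) = ([x], y :: ys) := by simp [takeRun, h]
      rw [hA, hT]
      have := ih (res ++ [t ++ [x]]) [] y
      simp only [List.nil_append] at this
      rw [this]
      rw [show chR (y :: ys) = (takeRun y ys).1 :: chR (takeRun y ys).2 from by rw [chR]]
      simp

theorem a_eq_chR (l : List Int) : split_neg_idx_list_py l = chR l := by
  cases l with
  | nil => simp [split_neg_idx_list_py, chR]
  | cons x xs =>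
    unfold split_neg_idx_list_py
    simp only [List.foldl_cons]
    have hA : aStep ([], []) x = ([], [x]) := by simp [aStep]
    rw [hA]
    have := a_fold xs [] [] x
    simp only [List.nil_append] at this
    rw [this]
    rw [show chR (x :: xs) = (takeRun x xs).1 :: chR (takeRun x xs).2 from by rw [chR]]

-- ---- B-side: the cut positions, in Nat ----

def bk : List Int → List Nat
  | [] => []
  | [_] => []
  | x :: y :: t => (if y ≠ x + 1 then [1] else []) ++ (bk (y :: t)).map (· + 1)

theorem bk_pos : ∀ (l : List Int), ∀ k ∈ bk l, 1 ≤ k := by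
  intro l
  induction l with
  | nil => simp [bk]
  | cons x tl ih =>
    cases tl with
    | nil => simp [bk]
    | cons y t =>
      intro k hk
      simp only [bk, List.mem_append, List.mem_map] at hk
      rcases hk with hk | ⟨a, _, rfl⟩
      · split at hk <;> simp_all
      · omega

-- the port's Int-valued cut list is bk plus the frame, cast to Int
theorem bk_spec (l : List Int) :
    (PySem.List.pyRange 1 (l.length : Int) 1).filter
      (fun i => !(PySem.List.pyGetD l i 0 == PySem.List.pyGetD l (i - 1) 0 + 1))
      = (bk l).map (fun k => (k : Int)) := by
  induction l with
  | nil => simp [bk, PySem.List.pyRange_one_eq_nil]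
  | cons x tl ih =>
    cases tl with
    | nil => simp [bk, PySem.List.pyRange_one_eq_nil]
    | cons y t =>
      have hn : ((x :: y :: t).length : Int) = (t.length : Int) + 2 := by
        simp; omega
      rw [hn, PySem.List.pyRange_one_cons (by omega)]
      have h2 : PySem.List.pyRange (1 + 1) ((t.length : Int) + 2) 1
          = (PySem.List.pyRange 1 ((t.length : Int) + 1) 1).map (· + 1) := by
        rw [PySem.List.pyRange_one, PySem.List.pyRange_one, List.map_map]
        have he : ((t.length : Int) + 2 - (1 + 1)).toNat = ((t.length : Int) + 1 - 1).toNat := by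
          omega
        rw [he]
        congr 1
        funext k
        simp [Function.comp]
        ring
      rw [List.filter_cons, h2, List.filter_map]
      have e1 : PySem.List.pyGetD (x :: y :: t) 1 0 = y := by
        rw [show (1 : Int) = ((1 : Nat) : Int) from by norm_num, PySem.List.pyGetD_natCast]
        simp
      have e0 : PySem.List.pyGetD (x :: y :: t) (1 - 1) 0 = x := by
        norm_num [PySem.List.pyGetD_zero_cons]
      have hcong :
          List.filter
            ((fun i => !(PySem.List.pyGetD (x :: y :: t) i 0 ==
                PySem.List.pyGetD (x :: y :: t) (i - 1) 0 + 1)) ∘ (· + 1))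
            (PySem.List.pyRange 1 ((t.length : Int) + 1) 1)
          = List.filter
              (fun i => !(PySem.List.pyGetD (y :: t) i 0 ==
                PySem.List.pyGetD (y :: t) (i - 1) 0 + 1))
              (PySem.List.pyRange 1 ((t.length : Int) + 1) 1) := by
        apply List.filter_congr
        intro i hi
        obtain ⟨h1, h2'⟩ := PySem.List.mem_pyRange_one.1 hi
        obtain ⟨k, rfl⟩ : ∃ k : Nat, i = (k : Int) := ⟨i.toNat, by omega⟩
        have hk1 : 1 ≤ k := by omega
        have ha : PySem.List.pyGetD (x :: y :: t) ((k : Int) + 1) 0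
            = PySem.List.pyGetD (y :: t) (k : Int) 0 := by
          rw [show ((k : Int) + 1) = ((k + 1 : Nat) : Int) from by push_cast; ring]
          rw [PySem.List.pyGetD_natCast, PySem.List.pyGetD_natCast]
          simp
        have hb : PySem.List.pyGetD (x :: y :: t) ((k : Int) + 1 - 1) 0
            = PySem.List.pyGetD (y :: t) ((k : Int) - 1) 0 := by
          rw [show ((k : Int) + 1 - 1) = ((k : Int)) from by ring,
              show ((k : Int) - 1) = ((k - 1 : Nat) : Int) from by omega]
          rw [PySem.List.pyGetD_natCast, PySem.List.pyGetD_natCast]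
          rw [show k = (k - 1) + 1 from by omega]
          simp
        simp only [Function.comp, ha, hb]
      rw [hcong]
      have hlen : ((t.length : Int) + 1) = (((y :: t).length : Nat) : Int) := by
        simp
      rw [hlen, ih]
      by_cases hxy : y = x + 1
      · subst hxy
        simp only [bk, e1, e0, ne_eq, not_true_eq_false, if_false, beq_self_eq_true,
          Bool.not_true, Bool.false_eq_true, List.nil_append]
        simp only [List.pure_def, List.bind_eq_flatMap, ← List.map_eq_flatMap,
          List.map_map]
        exact List.map_congr_left (fun a _ => by simp)
      · have hb : (!(PySem.List.pyGetD (x :: y :: t) 1 0 ==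
            PySem.List.pyGetD (x :: y :: t) (1 - 1) 0 + 1)) = true := by
          simp [e1, hxy]
        simp only [bk, hxy, ne_eq, not_false_eq_true, hb, if_pos,
          List.singleton_append]
        simp only [List.pure_def, List.bind_eq_flatMap, ← List.map_eq_flatMap,
          List.map_cons, List.map_map]
        congr 1

-- slices between consecutive cuts, Nat form
def cutsOf (l : List Int) : List Nat := 0 :: (bk l ++ [l.length])

def slicesF (l : List Int) (c : List Nat) : List (List Int) :=
  (c.zip c.tail).filterMap (fun p => if p.1 < p.2 then some ((l.drop p.1).take (p.2 - p.1)) else none)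

theorem alt_eq_slices (l : List Int) : split_neg_idx_list_py_alt l = slicesF l (cutsOf l) := by
  unfold split_neg_idx_list_py_alt slicesF cutsOf
  dsimp only
  rw [bk_spec]
  have hc : (0 : Int) :: ((bk l).map (fun k => (k : Int)) ++ [((l.length : Nat) : Int)])
      = (0 :: (bk l ++ [l.length])).map (fun k : Nat => (k : Int)) := by
    simp
    exact Eq.symm List.map_eq_flatMap
  simp only [hc]
  rw [← List.map_tail, List.zip_map, List.filterMap_map]
  congr 1
  funext p
  cases p with
  | mk a b =>
    simp only [Function.comp, Prod.map, Nat.cast_lt, PySem.List.slice_natCast]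

theorem slicesF_shift (x : Int) (tl : List Int) (c : List Nat) :
    slicesF (x :: tl) (c.map (· + 1)) = slicesF tl c := by
  unfold slicesF
  rw [← List.map_tail, List.zip_map, List.filterMap_map]
  congr 1
  funext p
  cases p with
  | mk a b =>
    simp only [Function.comp, Prod.map, Nat.add_lt_add_iff_right, List.drop_succ_cons,
      Nat.add_sub_add_right]

theorem slicesF_cons0 (l : List Int) (c₀ : Nat) (c'' : List Nat) :
    slicesF l (0 :: c₀ :: c'') =
      (if 0 < c₀ then [l.take c₀] else []) ++ slicesF l (c₀ :: c'') := by
  unfold slicesF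
  rw [List.tail_cons, List.zip_cons_cons, List.filterMap_cons]
  split <;> simp_all

theorem slices_eq_chR (l : List Int) : slicesF l (cutsOf l) = chR l := by
  induction l with
  | nil => simp [slicesF, cutsOf, bk, chR]
  | cons x tl ih =>
    cases tl with
    | nil =>
      rw [show chR [x] = (takeRun x []).1 :: chR (takeRun x []).2 from by rw [chR]]
      simp [slicesF, cutsOf, bk, takeRun, chR]
    | cons y t =>
      rw [show chR (x :: y :: t) = (takeRun x (y :: t)).1 :: chR (takeRun x (y :: t)).2
            from by rw [chR]]
      by_cases h : y = x + 1
      · -- continuing run: the first cut of the tail grows by one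
        have hbk : bk (x :: y :: t) = (bk (y :: t)).map (· + 1) := by simp [bk, h]
        obtain ⟨c₀, c'', hc⟩ : ∃ c₀ c'', bk (y :: t) ++ [(y :: t).length] = c₀ :: c'' := by
          cases hb : bk (y :: t) with
          | nil => exact ⟨_, _, rfl⟩
          | cons a as => exact ⟨_, _, rfl⟩
        have hc₀ : 1 ≤ c₀ := by
          cases hb : bk (y :: t) with
          | nil => rw [hb] at hc; simp at hc; omega
          | cons a as =>
            rw [hb] at hc
            have := bk_pos (y :: t) a (by rw [hb]; exact List.mem_cons_self)
            simp at hc; omega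
        have hcuts : cutsOf (x :: y :: t)
            = 0 :: (c₀ + 1) :: (c''.map (· + 1)) := by
          unfold cutsOf
          rw [hbk]
          have : (bk (y :: t)).map (· + 1) ++ [(x :: y :: t).length]
              = ((bk (y :: t) ++ [(y :: t).length]).map (· + 1)) := by simp
          rw [this, hc]
          simp
        rw [hcuts, slicesF_cons0, if_pos (by omega)]
        have hsh : (c₀ + 1) :: c''.map (· + 1) = ((c₀ :: c'').map (· + 1)) := by simp
        rw [hsh, slicesF_shift]
        -- unpack the IH through the tail's first chunk
        rw [cutsOf, hc, slicesF_cons0, if_pos (by omega)] at ih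
        rw [show chR (y :: t) = (takeRun y t).1 :: chR (takeRun y t).2 from by rw [chR]] at ih
        simp only [List.singleton_append, List.cons.injEq] at ih
        obtain ⟨ih1, ih2⟩ := ih
        have hT : takeRun x (y :: t) = ((takeRun y t).1.cons x, (takeRun y t).2) := by
          simp [takeRun, h]
        rw [hT]
        simp [← ih1, ← ih2, List.take_succ_cons]
      · -- break between x and y: cut position 1 appears
        have hbk : bk (x :: y :: t) = 1 :: (bk (y :: t)).map (· + 1) := by simp [bk, h]
        have hcuts : cutsOf (x :: y :: t)
            = 0 :: 1 :: ((bk (y :: t) ++ [(y :: t).length]).map (· + 1)) := by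
          unfold cutsOf
          rw [hbk]; simp
        rw [hcuts, slicesF_cons0, if_pos (by omega)]
        have hsh : (1 : Nat) :: ((bk (y :: t) ++ [(y :: t).length]).map (· + 1))
            = ((0 :: (bk (y :: t) ++ [(y :: t).length])).map (· + 1)) := by simp
        rw [hsh, slicesF_shift]
        have hT : takeRun x (y :: t) = ([x], y :: t) := by simp [takeRun, h]
        rw [hT]
        rw [show slicesF (y :: t) (0 :: (bk (y :: t) ++ [(y :: t).length])) = chR (y :: t)
              from ih]
        simp

-- ===== VERDICT (by name: the statement is the Claim_ definition above) =====
theorem split_neg_idx_list_py_spec : Claim_equal_split_neg_idx_list_py := by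
  intro l _
  show split_neg_idx_list_py l = split_neg_idx_list_py_alt l
  rw [a_eq_chR, alt_eq_slices, slices_eq_chR]
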